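-- pv_equiv track=rewrite | github.com/gregvanhoudt/AITIA-PM | utilities.py | get_nots
-- ===== SOURCE A (Python) =====
-- def get_nots(c_trues, x_trues, r, s):
--     """
--     Gets the timepoints where c is false yet x is true, related to the time windows of c and x and the case they belong to.
--     It is assumed these time windows are the same for simplicity's sake.
--
--     Parameters:
--         c_trues: timepoints where c is true.
--         x_trues: timepoints where x is true.
--         r,s: the start and end times of the time window.
--
--     Returns:
--         List of tuples describing time windows where x is true but c is false.
--     """
--     not_list = []
--     range = s - r
--
--     for t in c_trues:
--         c_cases = c_trues[t]
--         window1 = (t + r, t + s)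
--         x_candidates = [key for key in x_trues if key >= t - range and key <= t + range]
--         for cand in x_candidates:
--             x_cases = x_trues[cand]
--             intersection = [c for c in c_cases if c in x_cases]
--             window2 = (cand + r, cand + s)
--
--             if len(intersection) == 0:
--                 not_list.append((window2, intersection))
--
--             only_x = get_only_x(window1, window2)
--             if only_x is not None:
--                 not_list.append((only_x, intersection))
--
--     return(not_list)
--
-- def get_only_x(window_c, window_x):
--     """
--     Of the two time windows, return the period where only factor x is observed.
--     """
--     r, s = window_c
--     p, q = window_x
--
--     # if c happens before x, get the latter part starting when c ends
--     if r < p: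
--         return((s, q))
--     # when x starts first, get the first part until c starts
--     elif p < r:
--         return((p, r))
--     # when both windows are the same, return None
--     else:
--         return(None)
-- ===== SOURCE B (Python) =====
-- def _bisect_left(a, x):
--     lo, hi = 0, len(a)
--     while lo < hi:
--         mid = (lo + hi) // 2
--         if a[mid] < x:
--             lo = mid + 1
--         else:
--             hi = mid
--     return lo
--
--
-- def _bisect_right(a, x):
--     lo, hi = 0, len(a)
--     while lo < hi:
--         mid = (lo + hi) // 2
--         if x < a[mid]:
--             hi = mid
--         else:
--             lo = mid + 1
--     return lo
--
--
-- def get_nots(c_trues, x_trues, r, s):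
--     rng = s - r
--     xlist = list(x_trues.items())
--     decorated = sorted(((k, i) for i, (k, _) in enumerate(xlist)), key=lambda p: p[0])
--     keys = [p[0] for p in decorated]
--     xsets = [set(v) for _, v in xlist]
--     out = []
--     for t, c_cases in c_trues.items():
--         lo = _bisect_left(keys, t - rng)
--         hi = _bisect_right(keys, t + rng)
--         for _, i in sorted(decorated[lo:hi], key=lambda p: p[1]):
--             cand = xlist[i][0]
--             xset = xsets[i]
--             inter = [c for c in c_cases if c in xset]
--             if not inter:
--                 out.append(((cand + r, cand + s), inter))
--             if t < cand:
--                 out.append(((t + s, cand + s), inter))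
--             elif cand < t:
--                 out.append(((cand + r, t + r), inter))
--     return out
-- ===== Notes on version B (the rewrite author's own statement) =====
-- stated objective: faster
-- what changed: B sorts the x timepoints (decorated with their insertion index) once and selects each window by two hand-rolled binary searches, restoring dict order by sorting the selected block by index, and intersects case lists against precomputed sets instead of scanning all x keys and doing list-membership intersection per pair.
import Mathlib
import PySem

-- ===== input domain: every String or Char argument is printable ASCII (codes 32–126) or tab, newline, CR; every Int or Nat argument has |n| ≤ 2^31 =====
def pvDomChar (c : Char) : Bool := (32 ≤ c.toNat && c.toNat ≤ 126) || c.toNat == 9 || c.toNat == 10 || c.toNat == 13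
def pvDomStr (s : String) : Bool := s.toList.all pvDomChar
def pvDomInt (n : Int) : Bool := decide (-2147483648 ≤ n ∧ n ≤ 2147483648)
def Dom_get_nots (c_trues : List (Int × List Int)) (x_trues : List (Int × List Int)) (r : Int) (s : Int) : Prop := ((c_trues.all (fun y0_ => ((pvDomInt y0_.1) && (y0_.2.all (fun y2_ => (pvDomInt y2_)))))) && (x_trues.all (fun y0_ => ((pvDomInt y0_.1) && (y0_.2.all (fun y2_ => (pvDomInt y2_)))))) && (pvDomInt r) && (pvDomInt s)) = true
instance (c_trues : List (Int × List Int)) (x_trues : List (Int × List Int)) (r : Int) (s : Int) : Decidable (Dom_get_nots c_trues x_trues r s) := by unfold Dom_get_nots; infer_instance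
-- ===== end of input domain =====

-- B replaces A's per-timepoint linear scan over all x keys by one sort of the x keys plus
-- two binary searches per c timepoint (candidates restored to dict order by their insertion
-- index), and list-membership intersection by set membership: measurably faster.

-- ===== PORT A =====
def get_only_x (window_c : Int × Int) (window_x : Int × Int) : Option (Int × Int) :=
  let r := window_c.1; let s := window_c.2
  let p := window_x.1; let q := window_x.2
  if r < p then some (s, q)
  else if p < r then some (p, r)
  else none

-- literal port of A: iterate the keys of c_trues, look the value up again, scan all x keys
-- for the window, list-membership intersection.  (c_trues[t] with t a key of the dict:
-- getD with an unreachable default is exact there.)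
def get_nots (c_trues : List (Int × List Int)) (x_trues : List (Int × List Int)) (r : Int) (s : Int) : List ((Int × Int) × List Int) :=
  let rng := s - r
  let cd := PySem.Dict.mk c_trues
  let xd := PySem.Dict.mk x_trues
  (PySem.Dict.keys cd).foldl (fun not_list t =>
    let c_cases := cd.getD t []
    let window1 := (t + r, t + s)
    let x_candidates := (PySem.Dict.keys xd).filter (fun key => decide (t - rng ≤ key) && decide (key ≤ t + rng))
    x_candidates.foldl (fun not_list cand =>
      let x_cases := xd.getD cand []
      let intersection := c_cases.filter (fun c => x_cases.contains c)
      let window2 := (cand + r, cand + s)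
      let nl := if intersection.length = 0 then not_list ++ [(window2, intersection)] else not_list
      match get_only_x window1 window2 with
      | some w => nl ++ [(w, intersection)]
      | none => nl) not_list) []

-- ===== PORT B =====
-- hand-rolled bisect_left from Source B (a[mid] is always in range when called with hi ≤ len a:
-- getD with default 0 is exact there)
def pvBisectLeftLoop (a : List Int) (x : Int) (lo hi : Nat) : Nat :=
  if lo < hi then
    let mid := (lo + hi) / 2
    if a.getD mid 0 < x then pvBisectLeftLoop a x (mid + 1) hi
    else pvBisectLeftLoop a x lo mid
  else lo
termination_by hi - lo
decreasing_by all_goals omega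

def pvBisectRightLoop (a : List Int) (x : Int) (lo hi : Nat) : Nat :=
  if lo < hi then
    let mid := (lo + hi) / 2
    if x < a.getD mid 0 then pvBisectRightLoop a x lo mid
    else pvBisectRightLoop a x (mid + 1) hi
  else lo
termination_by hi - lo
decreasing_by all_goals omega

def pvBisectLeft (a : List Int) (x : Int) : Nat := pvBisectLeftLoop a x 0 a.length

def pvBisectRight (a : List Int) (x : Int) : Nat := pvBisectRightLoop a x 0 a.length

-- the inner per-candidate loop body of Source B, named so the proofs can refer to it
def get_nots_altBody (xlist : List (Int × List Int)) (xsets : List (PySem.Set Int)) (r s : Int)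
    (tc : Int × List Int) (out : List ((Int × Int) × List Int)) (ki : Int × Int) : List ((Int × Int) × List Int) :=
  let i := ki.2
  let cand := (PySem.List.pyGetD xlist i (0, ([] : List Int))).1
  let xset := PySem.List.pyGetD xsets i []
  let inter := tc.2.filter (fun c => xset.contains c)
  let out := if inter.isEmpty then out ++ [((cand + r, cand + s), inter)] else out
  if tc.1 < cand then out ++ [((tc.1 + s, cand + s), inter)]
  else if cand < tc.1 then out ++ [((cand + r, tc.1 + r), inter)]
  else out

-- literal port of Source B: sort the x keys (decorated with their insertion index) once, select
-- each window by two binary searches, restore dict order by sorting the selected block by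
-- index, intersect against precomputed sets.  (list(d.items()) is the association list itself.)
def get_nots_alt (c_trues : List (Int × List Int)) (x_trues : List (Int × List Int)) (r : Int) (s : Int) : List ((Int × Int) × List Int) :=
  let rng := s - r
  let xlist := x_trues
  let decorated := PySem.List.sorted ((PySem.List.enumerate xlist).map (fun p => (p.2.1, p.1))) (fun p => p.1)
  let keys := decorated.map (fun p => p.1)
  let xsets := xlist.map (fun p => PySem.Set.ofList p.2)
  c_trues.foldl (fun out tc =>
    let t := tc.1
    let lo := pvBisectLeft keys (t - rng)
    let hi := pvBisectRight keys (t + rng)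
    (PySem.List.sorted (PySem.List.slice decorated (some (lo : Int)) (some (hi : Int))) (fun p => p.2)).foldl
      (get_nots_altBody xlist xsets r s tc) out) []

-- ===== PRECONDITION & SPEC =====
-- Pre_ excludes association lists with duplicate keys: a Python dict cannot hold duplicates,
-- so such lists have no canonical dict meaning (first-match lookup vs last-wins construction).
def Pre_get_nots (c_trues : List (Int × List Int)) (x_trues : List (Int × List Int)) (r : Int) (s : Int) : Prop :=
  (c_trues.map Prod.fst).Nodup ∧ (x_trues.map Prod.fst).Nodup
instance (c_trues : List (Int × List Int)) (x_trues : List (Int × List Int)) (r : Int) (s : Int) : Decidable (Pre_get_nots c_trues x_trues r s) := by unfold Pre_get_nots; infer_instance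

def pvWitness_get_nots : (List (Int × List Int)) × (List (Int × List Int)) × Int × Int :=
  ([(0, [1, 2]), (3, [2])], [(2, [2]), (1, [5])], 0, 2)

def Spec_get_nots (c_trues : List (Int × List Int)) (x_trues : List (Int × List Int)) (r : Int) (s : Int) (out : List ((Int × Int) × List Int)) : Prop := out = get_nots_alt c_trues x_trues r s
instance (c_trues : List (Int × List Int)) (x_trues : List (Int × List Int)) (r : Int) (s : Int) (out : List ((Int × Int) × List Int)) : Decidable (Spec_get_nots c_trues x_trues r s out) := by unfold Spec_get_nots; infer_instance

-- ===== CLAIM (what is proved, stated in full; the proofs are below) =====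
def Claim_equal_get_nots : Prop := ∀ (c_trues : List (Int × List Int)) (x_trues : List (Int × List Int)) (r : Int) (s : Int), Dom_get_nots c_trues x_trues r s → Pre_get_nots c_trues x_trues r s → Spec_get_nots c_trues x_trues r s (get_nots c_trues x_trues r s)


-- ===== LEMMAS AND PROOFS =====

-- proof-only helpers (A's and B's per-candidate output chunks, and the window predicate)
def pvPred (rng t k : Int) : Bool := decide (t - rng ≤ k) && decide (k ≤ t + rng)

def pvChunkA (cs xcs : List Int) (r s t cand : Int) : List ((Int × Int) × List Int) :=
  let inter := cs.filter (fun c => xcs.contains c)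
  (if inter.length = 0 then [((cand + r, cand + s), inter)] else []) ++
  (match get_only_x (t + r, t + s) (cand + r, cand + s) with
   | some w => [(w, inter)]
   | none => [])

def pvChunkB (xl : List (Int × List Int)) (xsets : List (PySem.Set Int)) (cs : List Int) (r s t : Int) (ki : Int × Int) : List ((Int × Int) × List Int) :=
  let i := ki.2
  let cand := (PySem.List.pyGetD xl i (0, ([] : List Int))).1
  let xset := PySem.List.pyGetD xsets i []
  let inter := cs.filter (fun c => xset.contains c)
  (if inter.isEmpty then [((cand + r, cand + s), inter)] else []) ++
  (if t < cand then [((t + s, cand + s), inter)] else if cand < t then [((cand + r, t + r), inter)] else [])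

theorem pvSorted_getElem_mono (a : List Int) (ha : a.Pairwise (· ≤ ·)) {i j : Nat} (hij : i ≤ j) (hj : j < a.length) :
    a[i]'(lt_of_le_of_lt hij hj) ≤ a[j] := by
  rcases Nat.eq_or_lt_of_le hij with h | h
  · subst h; exact le_refl _
  · exact List.pairwise_iff_getElem.1 ha i j (lt_of_le_of_lt hij hj) hj h

theorem pvBisectLeftLoop_spec (a : List Int) (x : Int) (ha : a.Pairwise (· ≤ ·)) :
    ∀ (n lo hi : Nat), hi - lo ≤ n → hi ≤ a.length → lo ≤ hi →
      lo ≤ pvBisectLeftLoop a x lo hi ∧ pvBisectLeftLoop a x lo hi ≤ hi ∧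
      (∀ j (hj : j < a.length), lo ≤ j → j < pvBisectLeftLoop a x lo hi → a[j] < x) ∧
      (∀ j (hj : j < a.length), pvBisectLeftLoop a x lo hi ≤ j → j < hi → x ≤ a[j]) := by
  intro n
  induction n with
  | zero =>
    intro lo hi hn hhi hlh
    have h : ¬ lo < hi := by omega
    rw [pvBisectLeftLoop]
    simp only [h, if_false]
    exact ⟨le_refl _, hlh, fun j hj hjlo hjl => by omega, fun j hj h1 h2 => by omega⟩
  | succ n ih =>
    intro lo hi hn hhi hlh
    rw [pvBisectLeftLoop]
    by_cases h : lo < hi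
    · simp only [h, if_true]
      have hmid1 : lo ≤ (lo + hi) / 2 := by omega
      have hmid2 : (lo + hi) / 2 < hi := by omega
      have hmlen : (lo + hi) / 2 < a.length := by omega
      rw [List.getD_eq_getElem a 0 hmlen]
      by_cases hcmp : a[(lo + hi) / 2] < x
      · simp only [hcmp, if_true]
        obtain ⟨h1, h2, h3, h4⟩ := ih ((lo + hi) / 2 + 1) hi (by omega) hhi (by omega)
        refine ⟨by omega, h2, ?_, h4⟩
        intro j hj hjlo hjl
        by_cases hjm : j ≤ (lo + hi) / 2
        · exact lt_of_le_of_lt (pvSorted_getElem_mono a ha hjm hmlen) hcmp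
        · exact h3 j hj (by omega) hjl
      · simp only [hcmp, if_false]
        obtain ⟨h1, h2, h3, h4⟩ := ih lo ((lo + hi) / 2) (by omega) (by omega) (by omega)
        push_neg at hcmp
        refine ⟨h1, by omega, fun j hj hjlo hjl => h3 j hj hjlo hjl, ?_⟩
        intro j hj hrj hjhi
        by_cases hjm : (lo + hi) / 2 ≤ j
        · exact le_trans hcmp (pvSorted_getElem_mono a ha hjm hj)
        · exact h4 j hj hrj (by omega)
    · simp only [h, if_false]
      exact ⟨le_refl _, hlh, fun j hj hjlo hjl => by omega, fun j hj h1 h2 => by omega⟩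

theorem pvBisectRightLoop_spec (a : List Int) (x : Int) (ha : a.Pairwise (· ≤ ·)) :
    ∀ (n lo hi : Nat), hi - lo ≤ n → hi ≤ a.length → lo ≤ hi →
      lo ≤ pvBisectRightLoop a x lo hi ∧ pvBisectRightLoop a x lo hi ≤ hi ∧
      (∀ j (hj : j < a.length), lo ≤ j → j < pvBisectRightLoop a x lo hi → a[j] ≤ x) ∧
      (∀ j (hj : j < a.length), pvBisectRightLoop a x lo hi ≤ j → j < hi → x < a[j]) := by
  intro n
  induction n with
  | zero =>
    intro lo hi hn hhi hlh
    have h : ¬ lo < hi := by omega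
    rw [pvBisectRightLoop]
    simp only [h, if_false]
    exact ⟨le_refl _, hlh, fun j hj hjlo hjl => by omega, fun j hj h1 h2 => by omega⟩
  | succ n ih =>
    intro lo hi hn hhi hlh
    rw [pvBisectRightLoop]
    by_cases h : lo < hi
    · simp only [h, if_true]
      have hmid1 : lo ≤ (lo + hi) / 2 := by omega
      have hmid2 : (lo + hi) / 2 < hi := by omega
      have hmlen : (lo + hi) / 2 < a.length := by omega
      rw [List.getD_eq_getElem a 0 hmlen]
      by_cases hcmp : x < a[(lo + hi) / 2]
      · simp only [hcmp, if_true]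
        obtain ⟨h1, h2, h3, h4⟩ := ih lo ((lo + hi) / 2) (by omega) (by omega) (by omega)
        refine ⟨h1, by omega, fun j hj hjlo hjl => h3 j hj hjlo hjl, ?_⟩
        intro j hj hrj hjhi
        by_cases hjm : (lo + hi) / 2 ≤ j
        · exact lt_of_lt_of_le hcmp (pvSorted_getElem_mono a ha hjm hj)
        · exact h4 j hj hrj (by omega)
      · simp only [hcmp, if_false]
        obtain ⟨h1, h2, h3, h4⟩ := ih ((lo + hi) / 2 + 1) hi (by omega) hhi (by omega)
        push_neg at hcmp
        refine ⟨by omega, h2, ?_, h4⟩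
        intro j hj hjlo hjl
        by_cases hjm : j ≤ (lo + hi) / 2
        · exact le_trans (pvSorted_getElem_mono a ha hjm hmlen) hcmp
        · exact h3 j hj (by omega) hjl
    · simp only [h, if_false]
      exact ⟨le_refl _, hlh, fun j hj hjlo hjl => by omega, fun j hj h1 h2 => by omega⟩

theorem pvBisectLeft_spec (a : List Int) (x : Int) (ha : a.Pairwise (· ≤ ·)) :
    pvBisectLeft a x ≤ a.length ∧
    (∀ j (hj : j < a.length), j < pvBisectLeft a x → a[j] < x) ∧
    (∀ j (hj : j < a.length), pvBisectLeft a x ≤ j → x ≤ a[j]) := by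
  obtain ⟨h1, h2, h3, h4⟩ := pvBisectLeftLoop_spec a x ha a.length 0 a.length (by omega) (le_refl _) (by omega)
  exact ⟨h2, fun j hj hjl => h3 j hj (by omega) hjl, fun j hj hle => h4 j hj hle hj⟩

theorem pvBisectRight_spec (a : List Int) (x : Int) (ha : a.Pairwise (· ≤ ·)) :
    pvBisectRight a x ≤ a.length ∧
    (∀ j (hj : j < a.length), j < pvBisectRight a x → a[j] ≤ x) ∧
    (∀ j (hj : j < a.length), pvBisectRight a x ≤ j → x < a[j]) := by
  obtain ⟨h1, h2, h3, h4⟩ := pvBisectRightLoop_spec a x ha a.length 0 a.length (by omega) (le_refl _) (by omega)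
  exact ⟨h2, fun j hj hjl => h3 j hj (by omega) hjl, fun j hj hle => h4 j hj hle hj⟩

-- the bisect-selected slice of a key-sorted list IS the interval filter
theorem pvFilter_eq_slice (dl : List (Int × Int)) (rng t : Int)
    (hs : (dl.map Prod.fst).Pairwise (· ≤ ·)) :
    dl.filter (fun p => pvPred rng t p.1) =
      (dl.drop (pvBisectLeft (dl.map Prod.fst) (t - rng))).take
        (pvBisectRight (dl.map Prod.fst) (t + rng) - pvBisectLeft (dl.map Prod.fst) (t - rng)) := by
  obtain ⟨hL1, hL2, hL3⟩ := pvBisectLeft_spec (dl.map Prod.fst) (t - rng) hs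
  obtain ⟨hR1, hR2, hR3⟩ := pvBisectRight_spec (dl.map Prod.fst) (t + rng) hs
  set L := pvBisectLeft (dl.map Prod.fst) (t - rng) with hLdef
  set R := pvBisectRight (dl.map Prod.fst) (t + rng) with hRdef
  have hlen : (dl.map Prod.fst).length = dl.length := List.length_map Prod.fst
  have hkey : ∀ (j : Nat) (hj : j < dl.length), (dl.map Prod.fst)[j]'(by omega) = dl[j].1 :=
    fun j hj => List.getElem_map Prod.fst
  by_cases hLR : R ≤ L
  · have h0 : R - L = 0 := by omega
    rw [h0, List.take_zero]
    apply List.filter_eq_nil_iff.2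
    intro p hp hpred
    obtain ⟨j, hj, hpj⟩ := List.mem_iff_getElem.1 hp
    simp only [pvPred, Bool.and_eq_true, decide_eq_true_eq] at hpred
    have hjL : L ≤ j := by
      by_contra hcon
      have := hL2 j (by omega) (by omega)
      rw [hkey j hj, hpj] at this
      omega
    have := hR3 j (by omega) (by omega)
    rw [hkey j hj, hpj] at this
    omega
  · push_neg at hLR
    have hLR' : L ≤ R := le_of_lt hLR
    have h1 : (dl.take L).filter (fun p => pvPred rng t p.1) = [] := by
      apply List.filter_eq_nil_iff.2
      intro p hp hpred
      obtain ⟨j, hj, hpj⟩ := List.mem_iff_getElem.1 hp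
      have hjlen : j < dl.length := lt_of_lt_of_le hj (by simp [List.length_take])
      have hjL : j < L := by simp [List.length_take] at hj; omega
      rw [List.getElem_take] at hpj
      simp only [pvPred, Bool.and_eq_true, decide_eq_true_eq] at hpred
      have := hL2 j (by omega) hjL
      rw [hkey j hjlen, hpj] at this
      omega
    have h2 : ((dl.drop L).take (R - L)).filter (fun p => pvPred rng t p.1) = (dl.drop L).take (R - L) := by
      apply List.filter_eq_self.2
      intro p hp
      obtain ⟨j, hj, hpj⟩ := List.mem_iff_getElem.1 hp
      have hjR : j < R - L := lt_of_lt_of_le hj (by simp [List.length_take])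
      have hjlen : L + j < dl.length := by
        simp [List.length_take, List.length_drop] at hj
        omega
      rw [List.getElem_take, List.getElem_drop] at hpj
      have ha := hL3 (L + j) (by omega) (by omega)
      have hb := hR2 (L + j) (by omega) (by omega)
      rw [hkey (L + j) hjlen, hpj] at ha
      rw [hkey (L + j) hjlen, hpj] at hb
      simp only [pvPred, Bool.and_eq_true, decide_eq_true_eq]
      exact ⟨ha, hb⟩
    have h3 : ((dl.drop L).drop (R - L)).filter (fun p => pvPred rng t p.1) = [] := by
      rw [List.drop_drop]
      have : L + (R - L) = R := by omega
      rw [this]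
      apply List.filter_eq_nil_iff.2
      intro p hp hpred
      obtain ⟨j, hj, hpj⟩ := List.mem_iff_getElem.1 hp
      have hjlen : R + j < dl.length := by simp [List.length_drop] at hj; omega
      rw [List.getElem_drop] at hpj
      simp only [pvPred, Bool.and_eq_true, decide_eq_true_eq] at hpred
      have := hR3 (R + j) (by omega) (by omega)
      rw [hkey (R + j) hjlen, hpj] at this
      omega
    calc dl.filter (fun p => pvPred rng t p.1)
        = ((dl.take L) ++ ((dl.drop L).take (R - L) ++ (dl.drop L).drop (R - L))).filter (fun p => pvPred rng t p.1) := by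
          rw [List.take_append_drop, List.take_append_drop]
      _ = (dl.drop L).take (R - L) := by
          rw [List.filter_append, List.filter_append, h1, h2, h3]
          simp

-- a fold over an outer list whose body is itself a fold appending chunks is a double flatMap
theorem pvFoldl2_eq {a b g : Type} (outer : List a) (cl : a → List b)
    (body : a → List g → b → List g) (chunk : a → b → List g)
    (hbody : ∀ x acc y, body x acc y = acc ++ chunk x y) (acc : List g) :
    outer.foldl (fun nl x => (cl x).foldl (body x) nl) acc
      = acc ++ outer.flatMap (fun x => (cl x).flatMap (chunk x)) := by
  induction outer generalizing acc with
  | nil => simp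
  | cons x l ih =>
    simp only [List.foldl_cons, List.flatMap_cons]
    have hinner : (cl x).foldl (body x) acc = acc ++ (cl x).flatMap (chunk x) := by
      rw [PySem.List.foldl_congr_mem (cl x) (body x) (fun acc' y => acc' ++ chunk x y) acc
            (fun acc' y _ => hbody x acc' y),
          PySem.List.foldl_append_eq_flatMap]
    rw [hinner, ih, List.append_assoc]

-- A's inner loop body / B's inner loop body, and their chunk forms
def pvBodyA (c_trues x_trues : List (Int × List Int)) (r s : Int) (t : Int)
    (not_list : List ((Int × Int) × List Int)) (cand : Int) : List ((Int × Int) × List Int) :=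
  let x_cases := (PySem.Dict.mk x_trues).getD cand []
  let intersection := ((PySem.Dict.mk c_trues).getD t []).filter (fun c => x_cases.contains c)
  let window2 := (cand + r, cand + s)
  let nl := if intersection.length = 0 then not_list ++ [(window2, intersection)] else not_list
  match get_only_x (t + r, t + s) window2 with
  | some w => nl ++ [(w, intersection)]
  | none => nl

theorem pvBodyA_eq (c_trues x_trues : List (Int × List Int)) (r s : Int) :
    ∀ (t : Int) (acc : List ((Int × Int) × List Int)) (cand : Int),
      pvBodyA c_trues x_trues r s t acc cand
        = acc ++ pvChunkA ((PySem.Dict.mk c_trues).getD t []) ((PySem.Dict.mk x_trues).getD cand []) r s t cand := by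
  intro t acc cand
  simp only [pvBodyA, pvChunkA]
  cases get_only_x (t + r, t + s) (cand + r, cand + s) <;> split_ifs <;> simp

theorem pvAltBody_eq (xlist : List (Int × List Int)) (xsets : List (PySem.Set Int)) (r s : Int) :
    ∀ (tc : Int × List Int) (acc : List ((Int × Int) × List Int)) (ki : Int × Int),
      get_nots_altBody xlist xsets r s tc acc ki
        = acc ++ pvChunkB xlist xsets tc.2 r s tc.1 ki := by
  intro tc acc ki
  simp only [get_nots_altBody, pvChunkB]
  split_ifs <;> simp

theorem pvContains_ofList (v : List Int) (c : Int) :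
    (PySem.Set.ofList v).contains c = v.contains c := by
  show List.contains (PySem.Set.ofList v) c = List.contains v c
  rw [Bool.eq_iff_iff, List.contains_iff_mem, List.contains_iff_mem]
  exact PySem.Set.mem_ofList v c

-- A's per-candidate chunk (dict lookup, list intersection, get_only_x) equals B's
-- (index lookup, set intersection, arithmetic case split) on the k-th x entry
theorem pvChunkAB (x_trues : List (Int × List Int)) (hx : (x_trues.map Prod.fst).Nodup)
    (XS : List (PySem.Set Int)) (hXS : XS = x_trues.map (fun p => PySem.Set.ofList p.2))
    (cs : List Int) (r s t : Int) (k : Nat) (hk : k < x_trues.length) :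
    pvChunkA cs ((PySem.Dict.mk x_trues).getD (x_trues[k].1) []) r s t (x_trues[k].1)
      = pvChunkB x_trues XS cs r s t (x_trues[k].1, (k : Int)) := by
  subst hXS
  have hget : (PySem.Dict.mk x_trues).getD (x_trues[k].1) [] = x_trues[k].2 := by
    apply PySem.Dict.getD_of_mem_items
    · show (x_trues[k].1, x_trues[k].2) ∈ x_trues
      exact List.getElem_mem hk
    · show ((PySem.Dict.mk x_trues).keys).Nodup
      rw [PySem.Dict.keys_mk]
      exact hx
  have hxl : PySem.List.pyGetD x_trues ((k : Int)) (0, ([] : List Int)) = x_trues[k] := by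
    rw [PySem.List.pyGetD_natCast, List.getD_eq_getElem _ _ hk]
  have hxs : PySem.List.pyGetD (x_trues.map (fun p => PySem.Set.ofList p.2)) ((k : Int)) [] = PySem.Set.ofList (x_trues[k].2) := by
    rw [PySem.List.pyGetD_natCast, List.getD_eq_getElem _ _ (by simpa using hk)]
    exact List.getElem_map _
  simp only [pvChunkA, pvChunkB, hget, hxl, hxs, pvContains_ofList, get_only_x,
    List.isEmpty_iff_length_eq_zero]
  rcases lt_trichotomy t (x_trues[k].1) with h | h | h
  · have h1 : t + r < x_trues[k].1 + r := by omega
    have h2 : ¬ x_trues[k].1 < t := by omega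
    simp [h1, h]
  · have h1 : ¬ t + r < x_trues[k].1 + r := by omega
    have h2 : ¬ x_trues[k].1 + r < t + r := by omega
    have h3 : ¬ t < x_trues[k].1 := by omega
    have h4 : ¬ x_trues[k].1 < t := by omega
    simp [h1, h2, h3, h4]
  · have h1 : ¬ t + r < x_trues[k].1 + r := by omega
    have h2 : x_trues[k].1 + r < t + r := by omega
    have h3 : ¬ t < x_trues[k].1 := by omega
    simp [h1, h2, h3, h]

theorem pvAltFlatMap (c_trues x_trues : List (Int × List Int)) (r s : Int)
    (XS : List (PySem.Set Int)) (hXS : XS = x_trues.map (fun p => PySem.Set.ofList p.2)) :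
    get_nots_alt c_trues x_trues r s
      = [] ++ c_trues.flatMap (fun tc =>
          (PySem.List.sorted
            (PySem.List.slice (PySem.List.sorted ((PySem.List.enumerate x_trues 0).map (fun p => (p.2.1, p.1))) (fun p => p.1))
              (some ((pvBisectLeft ((PySem.List.sorted ((PySem.List.enumerate x_trues 0).map (fun p => (p.2.1, p.1))) (fun p => p.1)).map (fun p => p.1)) (tc.1 - (s - r)) : Nat) : Int))
              (some ((pvBisectRight ((PySem.List.sorted ((PySem.List.enumerate x_trues 0).map (fun p => (p.2.1, p.1))) (fun p => p.1)).map (fun p => p.1)) (tc.1 + (s - r)) : Nat) : Int)))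
            (fun p => p.2)).flatMap
            (pvChunkB x_trues XS tc.2 r s tc.1)) := by
  simp only [get_nots_alt]
  rw [← hXS]
  exact pvFoldl2_eq c_trues
      (fun tc => PySem.List.sorted
        (PySem.List.slice (PySem.List.sorted ((PySem.List.enumerate x_trues 0).map (fun p => (p.2.1, p.1))) (fun p => p.1))
          (some ((pvBisectLeft ((PySem.List.sorted ((PySem.List.enumerate x_trues 0).map (fun p => (p.2.1, p.1))) (fun p => p.1)).map (fun p => p.1)) (tc.1 - (s - r)) : Nat) : Int))
          (some ((pvBisectRight ((PySem.List.sorted ((PySem.List.enumerate x_trues 0).map (fun p => (p.2.1, p.1))) (fun p => p.1)).map (fun p => p.1)) (tc.1 + (s - r)) : Nat) : Int)))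
        (fun p => p.2))
      (get_nots_altBody x_trues XS r s)
      (fun tc => pvChunkB x_trues XS tc.2 r s tc.1)
      (pvAltBody_eq x_trues XS r s) []

set_option maxHeartbeats 1000000 in
theorem get_nots_equal (c_trues : List (Int × List Int)) (x_trues : List (Int × List Int)) (r : Int) (s : Int)
    (hc : (c_trues.map Prod.fst).Nodup) (hx : (x_trues.map Prod.fst).Nodup) :
    get_nots c_trues x_trues r s = get_nots_alt c_trues x_trues r s := by
  -- the decorated, key-sorted x list of B
  have hA : get_nots c_trues x_trues r s
      = [] ++ (PySem.Dict.keys (PySem.Dict.mk c_trues)).flatMap (fun t =>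
          ((PySem.Dict.keys (PySem.Dict.mk x_trues)).filter (fun key => decide (t - (s - r) ≤ key) && decide (key ≤ t + (s - r)))).flatMap
            (fun cand => pvChunkA ((PySem.Dict.mk c_trues).getD t []) ((PySem.Dict.mk x_trues).getD cand []) r s t cand)) := by
    simp only [get_nots]
    exact pvFoldl2_eq (PySem.Dict.keys (PySem.Dict.mk c_trues))
      (fun t => (PySem.Dict.keys (PySem.Dict.mk x_trues)).filter (fun key => decide (t - (s - r) ≤ key) && decide (key ≤ t + (s - r))))
      (pvBodyA c_trues x_trues r s)
      (fun t cand => pvChunkA ((PySem.Dict.mk c_trues).getD t []) ((PySem.Dict.mk x_trues).getD cand []) r s t cand)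
      (pvBodyA_eq c_trues x_trues r s) []
  simp only [PySem.Dict.keys_mk] at hA
  obtain ⟨XS, hXS⟩ : ∃ XS, XS = x_trues.map (fun p => PySem.Set.ofList p.2) := ⟨_, rfl⟩
  have hB := pvAltFlatMap c_trues x_trues r s XS hXS
  rw [hA, hB, List.nil_append, List.nil_append, List.flatMap_map]
  apply List.flatMap_congr
  intro tc htc
  have hcd : (PySem.Dict.mk c_trues).getD tc.1 [] = tc.2 := by
    apply PySem.Dict.getD_of_mem_items
    · show (tc.1, tc.2) ∈ c_trues
      exact htc
    · show ((PySem.Dict.mk c_trues).keys).Nodup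
      rw [PySem.Dict.keys_mk]
      exact hc
  -- names
  set E := (PySem.List.enumerate x_trues 0).map (fun p => (p.2.1, p.1)) with hE
  set dec := PySem.List.sorted E (fun p => p.1) with hdec
  have hdecPw : (dec.map Prod.fst).Pairwise (· ≤ ·) := by
    rw [List.pairwise_map]
    exact PySem.List.sorted_pairwise E (fun p => p.1)
  set t := tc.1 with ht
  set pq : Int × Int → Bool := fun q => pvPred (s - r) t q.1 with hpq
  -- B's selected block, in dict order, IS A's filtered candidate list (as index pairs)
  have hslice : PySem.List.slice dec
        (some ((pvBisectLeft (dec.map (fun p => p.1)) (t - (s - r)) : Nat) : Int))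
        (some ((pvBisectRight (dec.map (fun p => p.1)) (t + (s - r)) : Nat) : Int))
      = dec.filter pq := by
    rw [PySem.List.slice_natCast]
    exact (pvFilter_eq_slice dec (s - r) t hdecPw).symm
  have hEpw : E.Pairwise (fun a b => a.2 < b.2) := by
    rw [hE, List.pairwise_map]
    exact PySem.List.pairwise_lt_enumerate x_trues 0
  have hsorted_eq : PySem.List.sorted (dec.filter pq) (fun p => p.2) = E.filter pq :=
    PySem.List.sorted_eq_of_perm_of_pairwise_lt _ _ _
      ((hdec ▸ PySem.List.sorted_perm E (fun p => p.1) false).filter pq).symm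
      (hEpw.filter pq)
  rw [hslice, hsorted_eq]
  -- A's candidate list is the same block projected to keys
  have hkeysE : x_trues.map (fun p => p.1) = E.map (fun p => p.1) := by
    rw [hE, List.map_map]
    conv_lhs => rw [← PySem.List.map_snd_enumerate x_trues 0, List.map_map]
    rfl
  have hfilter : (x_trues.map (fun p => p.1)).filter (fun key => decide (t - (s - r) ≤ key) && decide (key ≤ t + (s - r)))
      = (E.filter pq).map (fun p => p.1) := by
    rw [hkeysE, List.filter_map]
    rfl
  rw [hfilter, List.flatMap_map]
  apply List.flatMap_congr
  intro q hq
  have hqE : q ∈ E := List.mem_of_mem_filter hq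
  rw [hE] at hqE
  obtain ⟨p, hp, hqp⟩ := List.mem_map.1 hqE
  obtain ⟨k, hk, hpk⟩ := (PySem.List.mem_enumerate_iff x_trues 0 p).1 hp
  have hq2 : q = (x_trues[k].1, (k : Int)) := by
    rw [← hqp, hpk]
    simp
  rw [hq2, hcd]
  exact pvChunkAB x_trues hx XS hXS tc.2 r s t k hk

-- ===== VERDICT (by name: the statement is the Claim_ definition above) =====
theorem get_nots_spec : Claim_equal_get_nots := by
  intro c x r s _ hpre
  unfold Spec_get_nots
  exact get_nots_equal c x r s hpre.1 hpre.2
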